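-- pv_equiv track=rewrite | github.com/genie0320/python_crawler | myutil.py | header_converter
-- ===== SOURCE A (Python) =====
-- def header_converter(text):
--     elements = text.split()
--     result_dict = {}
--     key = None
--     value = []
--
--     for element in elements:
--         if element.endswith(":"):
--             if key is not None:
--                 result_dict[key.rstrip(":")] = " ".join(value)
--             key = element
--             value = []
--         else:
--             value.append(element)
--
--     if key is not None:
--         result_dict[key.rstrip(":")] = " ".join(value)
--
--     return result_dict
-- ===== SOURCE B (Python) =====
-- def header_converter(text):
--     tokens = text.split()
--     keys = [(i, t) for i, t in enumerate(tokens) if t.endswith(":")]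
--     bounds = [i for i, _ in keys[1:]] + [len(tokens)]
--     return {t.rstrip(":"): " ".join(tokens[i + 1:j]) for (i, t), j in zip(keys, bounds)}
-- ===== Notes on version B (the rewrite author's own statement) =====
-- stated objective: alternative
-- what changed: Replaces A's single-pass accumulator (running key, value buffer, two flush sites) by staged passes: first collect the indexed key positions via enumerate+filter, then pair each key with the next key's index (or the end) and build each value as a slice tokens[i+1:j], assembling the dict in one comprehension.
import Mathlib
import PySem

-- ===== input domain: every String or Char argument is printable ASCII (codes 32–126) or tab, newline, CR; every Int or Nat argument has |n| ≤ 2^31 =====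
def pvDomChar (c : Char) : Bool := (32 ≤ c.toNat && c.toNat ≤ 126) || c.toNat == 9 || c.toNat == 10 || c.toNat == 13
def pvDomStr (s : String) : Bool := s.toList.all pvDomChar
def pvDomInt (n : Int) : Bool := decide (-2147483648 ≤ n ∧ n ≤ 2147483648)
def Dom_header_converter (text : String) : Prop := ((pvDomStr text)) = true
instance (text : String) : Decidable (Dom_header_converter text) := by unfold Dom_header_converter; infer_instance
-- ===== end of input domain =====

-- B replaces A's single-pass accumulator (running key, value buffer, two flush sites) by staged
-- passes: collect indexed key positions, pair each with the next key's index (or the end),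
-- and build each value as a slice tokens[i+1:j] (objective: alternative decomposition).

-- s.rstrip(":"): PySem has no one-sided strip-with-chars form, so this is a hand port, exact for
-- the single strip character ':' — it removes exactly the trailing ':' characters.
def pvRstripColon (s : String) : String :=
  String.ofList ((s.toList.reverse.dropWhile (fun c => c == ':')).reverse)

-- ===== PORT A =====
-- the two identical flush sites of A ('if key is not None: result_dict[key.rstrip(":")] = " ".join(value)')
def pvFlushA (d : PySem.Dict String String) (key : Option String) (value : List String) :
    PySem.Dict String String :=
  match key with
  | none => d
  | some k => d.insert (pvRstripColon k) (PySem.Str.join " " value)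

-- the loop body of A over the state (result_dict, key, value)
def pvStepA (st : PySem.Dict String String × Option String × List String) (element : String) :
    PySem.Dict String String × Option String × List String :=
  if PySem.Str.endswith element ":" then
    (pvFlushA st.1 st.2.1 st.2.2, some element, ([] : List String))
  else
    (st.1, st.2.1, st.2.2 ++ [element])

def header_converter (text : String) : List (String × String) :=
  (pvFlushA ((PySem.Str.split₀ text).foldl pvStepA (PySem.Dict.empty, none, [])).1
     ((PySem.Str.split₀ text).foldl pvStepA (PySem.Dict.empty, none, [])).2.1
     ((PySem.Str.split₀ text).foldl pvStepA (PySem.Dict.empty, none, [])).2.2).items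

-- ===== PORT B =====
def header_converter_alt (text : String) : List (String × String) :=
  let tokens := PySem.Str.split₀ text
  -- keys = [(i, t) for i, t in enumerate(tokens) if t.endswith(":")]
  let keys := (PySem.List.enumerate tokens 0).filter (fun p => PySem.Str.endswith p.2 ":")
  -- bounds = [i for i, _ in keys[1:]] + [len(tokens)]
  let bounds := (PySem.List.slice keys (some 1) none).map (fun p => p.1) ++ [(tokens.length : Int)]
  -- {t.rstrip(":"): " ".join(tokens[i + 1:j]) for (i, t), j in zip(keys, bounds)}
  ((keys.zip bounds).foldl
    (fun (d : PySem.Dict String String) p =>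
      d.insert (pvRstripColon p.1.2)
        (PySem.Str.join " " (PySem.List.slice tokens (some (p.1.1 + 1)) (some p.2))))
    PySem.Dict.empty).items

-- ===== PRECONDITION & SPEC =====
def Spec_header_converter (text : String) (out : List (String × String)) : Prop := out = header_converter_alt text
instance (text : String) (out : List (String × String)) : Decidable (Spec_header_converter text out) := by unfold Spec_header_converter; infer_instance

-- ===== CLAIM (what is proved, stated in full; the proofs are below) =====
def Claim_equal_header_converter : Prop := ∀ (text : String), Dom_header_converter text → Spec_header_converter text (header_converter text)

-- ===== LEMMAS AND PROOFS =====

-- the group list produced from a current open group p by the remaining tokens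
def pvGroupsFrom (p : String × List String) : List String → List (String × List String)
  | [] => [p]
  | e :: ts =>
    if PySem.Str.endswith e ":" then p :: pvGroupsFrom (pvRstripColon e, []) ts
    else pvGroupsFrom (p.1, p.2 ++ [e]) ts

-- the group list produced before any key has been seen
def pvGroupsNone : List String → List (String × List String)
  | [] => []
  | e :: ts =>
    if PySem.Str.endswith e ":" then pvGroupsFrom (pvRstripColon e, []) ts
    else pvGroupsNone ts

def pvInsG (d : PySem.Dict String String) (p : String × List String) : PySem.Dict String String :=
  d.insert p.1 (PySem.Str.join " " p.2)

-- ===== A-side characterization =====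
theorem pvA_run (ts : List String) : ∀ (d : PySem.Dict String String) (k : String)
    (v : List String),
    pvFlushA (ts.foldl pvStepA (d, some k, v)).1 (ts.foldl pvStepA (d, some k, v)).2.1
        (ts.foldl pvStepA (d, some k, v)).2.2
      = (pvGroupsFrom (pvRstripColon k, v) ts).foldl pvInsG d := by
  induction ts with
  | nil => intro d k v; rfl
  | cons e ts ih =>
    intro d k v
    rw [List.foldl_cons, pvGroupsFrom]
    by_cases h : PySem.Str.endswith e ":" = true
    · rw [if_pos h, pvStepA, if_pos h, List.foldl_cons]
      exact ih (d.insert (pvRstripColon k) (PySem.Str.join " " v)) e []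
    · rw [if_neg h, pvStepA, if_neg h]
      exact ih d k (v ++ [e])

theorem pvA_run0 (ts : List String) : ∀ (d : PySem.Dict String String) (v : List String),
    pvFlushA (ts.foldl pvStepA (d, none, v)).1 (ts.foldl pvStepA (d, none, v)).2.1
        (ts.foldl pvStepA (d, none, v)).2.2
      = (pvGroupsNone ts).foldl pvInsG d := by
  induction ts with
  | nil => intro d v; rfl
  | cons e ts ih =>
    intro d v
    rw [List.foldl_cons, pvGroupsNone]
    by_cases h : PySem.Str.endswith e ":" = true
    · rw [if_pos h, pvStepA, if_pos h]
      exact pvA_run ts d e []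
    · rw [if_neg h, pvStepA, if_neg h]
      exact ih d (v ++ [e])

-- ===== B-side characterization =====

-- key positions of a token list, with Nat indices (shift-recursive form)
def pvNatKeys : List String → List (Nat × String)
  | [] => []
  | e :: ts =>
    if PySem.Str.endswith e ":" then
      (0, e) :: (pvNatKeys ts).map (fun p => (p.1 + 1, p.2))
    else (pvNatKeys ts).map (fun p => (p.1 + 1, p.2))

-- the upper bound a group at the head of ks gets (next key's index, or n)
def pvBound (n : Nat) : List (Nat × String) → Nat
  | [] => n
  | (j, _) :: _ => j

-- the (key, value-token-list) entries B's zip produces, in drop/take form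
def pvEnts (ts : List String) : List (Nat × String) → List (String × List String)
  | [] => []
  | (i, t) :: rest =>
    (pvRstripColon t, (ts.drop (i + 1)).take (pvBound ts.length rest - (i + 1))) :: pvEnts ts rest

theorem pvEnum_filter (ts : List String) : ∀ (s : Int),
    (PySem.List.enumerate ts s).filter (fun p => PySem.Str.endswith p.2 ":")
      = (pvNatKeys ts).map (fun p => (s + (p.1 : Int), p.2)) := by
  induction ts with
  | nil => intro s; rfl
  | cons e ts ih =>
    intro s
    rw [PySem.List.enumerate_cons, pvNatKeys]
    cases h : PySem.Str.endswith e ":" with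
    | true =>
      rw [if_pos rfl, List.filter_cons_of_pos (by simpa using h), ih (s + 1), List.map_cons,
        List.map_map]
      refine congrArg₂ _ (by simp) ?_
      apply List.map_congr_left; intro p _
      simp only [Function.comp_apply]
      refine congrArg₂ _ ?_ rfl
      push_cast; ring
    | false =>
      rw [if_neg (by simp), List.filter_cons_of_neg (by simpa using h), ih (s + 1),
        List.map_map]
      apply List.map_congr_left; intro p _
      simp only [Function.comp_apply]
      refine congrArg₂ _ ?_ rfl
      push_cast; ring

theorem pvBound_shift (n : Nat) (ks : List (Nat × String)) :
    pvBound (n + 1) (ks.map (fun p => (p.1 + 1, p.2))) = pvBound n ks + 1 := by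
  cases ks with
  | nil => rfl
  | cons p ps => cases p; rfl

theorem pvEnts_shift (e : String) (ts : List String) (ks : List (Nat × String)) :
    pvEnts (e :: ts) (ks.map (fun p => (p.1 + 1, p.2))) = pvEnts ts ks := by
  induction ks with
  | nil => rfl
  | cons p ps ih =>
    cases p with
    | mk i t =>
      rw [List.map_cons, pvEnts, pvEnts, ih, List.length_cons, pvBound_shift,
        List.drop_succ_cons]
      have hsub : pvBound ts.length ps + 1 - (i + 1 + 1) = pvBound ts.length ps - (i + 1) := by
        omega
      rw [hsub]

theorem pvBound_natKeys (ts : List String) :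
    pvBound ts.length (pvNatKeys ts)
      = (ts.takeWhile (fun x => !PySem.Str.endswith x ":")).length := by
  induction ts with
  | nil => rfl
  | cons e ts ih =>
    rw [pvNatKeys]
    cases h : PySem.Str.endswith e ":" with
    | true =>
      rw [if_pos rfl, List.takeWhile_cons, h]
      rfl
    | false =>
      rw [if_neg (by simp), List.takeWhile_cons, h, List.length_cons, pvBound_shift, ih]
      simp

theorem pvGroupsFrom_span (ts : List String) : ∀ (k : String) (v : List String),
    pvGroupsFrom (k, v) ts
      = (k, v ++ ts.takeWhile (fun x => !PySem.Str.endswith x ":"))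
          :: pvGroupsNone (ts.dropWhile (fun x => !PySem.Str.endswith x ":")) := by
  induction ts with
  | nil => intro k v; simp [pvGroupsFrom, pvGroupsNone]
  | cons e ts ih =>
    intro k v
    rw [pvGroupsFrom, List.takeWhile_cons, List.dropWhile_cons]
    cases h : PySem.Str.endswith e ":" with
    | true =>
      rw [if_pos rfl]
      simp only [Bool.not_true, Bool.false_eq_true, if_false]
      rw [pvGroupsNone, h, if_pos rfl]
      simp
    | false =>
      rw [if_neg (by simp)]
      simp only [Bool.not_false, if_true]
      rw [ih k (v ++ [e]), List.append_assoc]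
      rfl

theorem pvGroupsNone_dropWhile (ts : List String) :
    pvGroupsNone (ts.dropWhile (fun x => !PySem.Str.endswith x ":")) = pvGroupsNone ts := by
  induction ts with
  | nil => rfl
  | cons e ts ih =>
    rw [List.dropWhile_cons]
    cases h : PySem.Str.endswith e ":" with
    | true =>
      simp only [Bool.not_true, Bool.false_eq_true, if_false]
    | false =>
      simp only [Bool.not_false, if_true]
      rw [ih, pvGroupsNone, h, if_neg (by simp)]

theorem pvEnts_eq_groups (ts : List String) :
    pvEnts ts (pvNatKeys ts) = pvGroupsNone ts := by
  induction ts with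
  | nil => rfl
  | cons e ts ih =>
    rw [pvNatKeys, pvGroupsNone]
    cases h : PySem.Str.endswith e ":" with
    | true =>
      rw [if_pos rfl, if_pos rfl, pvEnts, pvEnts_shift, ih,
        pvGroupsFrom_span, pvGroupsNone_dropWhile]
      congr 1
      rw [List.length_cons, pvBound_shift, pvBound_natKeys]
      simp only [Nat.add_sub_cancel, List.drop_succ_cons, List.drop_zero, List.nil_append]
      congr 1
      exact (List.prefix_iff_eq_take.mp (List.takeWhile_prefix _)).symm
    | false =>
      rw [if_neg (by simp), if_neg (by simp), pvEnts_shift, ih]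

-- B's zip-over-bounds fold list, mapped to entries, is pvEnts
theorem pvZip_ents (ts : List String) : ∀ (ks : List (Nat × String)),
    (((ks.map (fun p => ((p.1 : Int), p.2))).zip
        ((ks.drop 1).map (fun p => ((p.1 : Nat) : Int)) ++ [(ts.length : Int)])).map
      (fun p => (pvRstripColon p.1.2, PySem.List.slice ts (some (p.1.1 + 1)) (some p.2))))
      = pvEnts ts ks := by
  intro ks
  induction ks with
  | nil => rfl
  | cons p ps ih =>
    cases p with
    | mk i t =>
      have hcast : ((i : Int) + 1) = ((i + 1 : Nat) : Int) := by push_cast; ring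
      cases ps with
      | nil =>
        simp only [List.map_cons, List.map_nil, List.drop_succ_cons, List.drop_nil,
          List.nil_append, List.zip_cons_cons, List.zip_nil_right,
          List.map_nil, pvEnts, pvBound]
        rw [hcast, PySem.List.slice_natCast]
      | cons q qs =>
        cases q with
        | mk j u =>
          simp only [List.drop_succ_cons, List.drop_zero, List.map_cons] at ih
          simp only [List.map_cons, List.drop_succ_cons, List.drop_zero, List.cons_append,
            List.zip_cons_cons]
          rw [pvEnts, ih]
          congr 1
          rw [hcast, PySem.List.slice_natCast]
          rfl

theorem pvB_eq_fold (ts : List String) :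
    ((((PySem.List.enumerate ts 0).filter (fun p => PySem.Str.endswith p.2 ":")).zip
        ((PySem.List.slice ((PySem.List.enumerate ts 0).filter
            (fun p => PySem.Str.endswith p.2 ":")) (some 1) none).map (fun p => p.1)
          ++ [(ts.length : Int)])).foldl
      (fun (d : PySem.Dict String String) p =>
        d.insert (pvRstripColon p.1.2)
          (PySem.Str.join " " (PySem.List.slice ts (some (p.1.1 + 1)) (some p.2))))
      PySem.Dict.empty)
    = (pvGroupsNone ts).foldl pvInsG PySem.Dict.empty := by
  have hk : (PySem.List.enumerate ts 0).filter (fun p => PySem.Str.endswith p.2 ":")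
      = (pvNatKeys ts).map (fun p => ((p.1 : Int), p.2)) := by
    rw [pvEnum_filter ts 0]
    apply List.map_congr_left; intro p _; simp
  rw [hk, PySem.List.slice_from_one, ← List.drop_one, ← List.map_drop, List.map_map]
  simp only [Function.comp_def]
  have hfold : ∀ (l : List ((Int × String) × Int)) (f : (Int × String) × Int → String × List String)
      (d : PySem.Dict String String),
      l.foldl (fun d p => d.insert (f p).1 (PySem.Str.join " " (f p).2)) d
        = (l.map f).foldl pvInsG d := by
    intro l f d
    rw [List.foldl_map]
    rfl
  rw [hfold _ (fun p => (pvRstripColon p.1.2, PySem.List.slice ts (some (p.1.1 + 1)) (some p.2)))]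
  rw [pvZip_ents ts (pvNatKeys ts), pvEnts_eq_groups]

-- ===== VERDICT (by name: the statement is the Claim_ definition above) =====
theorem header_converter_spec : Claim_equal_header_converter := by
  intro text _
  unfold Spec_header_converter header_converter header_converter_alt
  rw [pvA_run0, ← pvB_eq_fold]
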